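-- pv_equiv track=rewrite | github.com/Dormailler/Algorithm | 프로그래머스/unrated/181916. 주사위 게임 3/주사위 게임 3.py | solution
-- ===== SOURCE A (Python) =====
-- def solution(a, b, c, d):
--     dic = {}
--     dic[a] = 1
--     if b not in dic:
--         dic[b] = 1
--     else:
--         dic[b] += 1
--     if c not in dic:
--         dic[c] = 1
--     else:
--         dic[c] += 1
--     if d not in dic:
--         dic[d] = 1
--     else:
--         dic[d] += 1
--     point = 0
--     if len(dic) == 1:
--         point += a * 1111
--     elif len(dic) == 2:
--         a = []
--         b = []
--         for i in dic:
--             if dic[i] == 1: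
--                 a.append(i)
--             elif dic[i] == 2:
--                 b.append(i)
--             else:
--                 a.insert(0,i)
--         if len(b) == 2:
--             point += (b[0] + b[1]) * abs(b[0]-b[1])
--         else:
--             point += (10*a[0] + a[1]) ** 2
--     elif len(dic) == 3:
--         a = []
--         for i in dic:
--             if dic[i] != 2:
--                 a.append(i)
--         point += a[0] * a[1]
--     else:
--         point += min(a,b,c,d)
--
--
--
--     return point
-- ===== SOURCE B (Python) =====
-- def classify(w, x, y, z):
--     # w <= x <= y <= z: classify by adjacency in the sorted order
--     if w == z:
--         return w * 1111
--     if w == y: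
--         return (10 * w + z) ** 2
--     if x == z:
--         return (10 * x + w) ** 2
--     if w == x and y == z:
--         return (w + y) * (y - w)
--     if w == x:
--         return y * z
--     if x == y:
--         return w * z
--     if y == z:
--         return w * x
--     return w
--
--
-- def solution(a, b, c, d):
--     w, x, y, z = sorted([a, b, c, d])
--     return classify(w, x, y, z)
-- ===== Notes on version B (the rewrite author's own statement) =====
-- stated objective: idiomatic
-- what changed: Replaced the frequency-dictionary with its per-key membership updates and two classification loops by sorting the four values once and classifying the hand by positional equalities in the sorted order.
import Mathlib
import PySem

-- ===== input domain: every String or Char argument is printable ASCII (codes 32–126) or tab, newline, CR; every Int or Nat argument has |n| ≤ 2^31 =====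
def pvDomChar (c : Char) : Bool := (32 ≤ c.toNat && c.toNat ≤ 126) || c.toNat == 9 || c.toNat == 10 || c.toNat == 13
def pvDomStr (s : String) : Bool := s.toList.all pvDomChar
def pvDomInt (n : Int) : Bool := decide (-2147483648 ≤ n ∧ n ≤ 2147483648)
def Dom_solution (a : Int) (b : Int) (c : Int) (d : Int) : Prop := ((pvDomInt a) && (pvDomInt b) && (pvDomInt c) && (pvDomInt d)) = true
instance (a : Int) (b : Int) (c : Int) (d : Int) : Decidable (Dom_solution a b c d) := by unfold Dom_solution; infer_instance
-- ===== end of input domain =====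

-- B replaces A's frequency dictionary and classification loops by one sort of the
-- four values and a positional classification of the sorted quadruple (idiomatic).

-- ===== PORT A =====
-- literal port of A; the list indexings b[0], b[1], a[0], a[1] are ported with
-- pyGetD, exact here because every reached index is in range on every input.
def solution (a : Int) (b : Int) (c : Int) (d : Int) : Int :=
  let dic : PySem.Dict Int Int := (PySem.Dict.empty).insert a 1
  let dic := if dic.contains b = false then dic.insert b 1 else dic.modify b 0 (· + 1)
  let dic := if dic.contains c = false then dic.insert c 1 else dic.modify c 0 (· + 1)
  let dic := if dic.contains d = false then dic.insert d 1 else dic.modify d 0 (· + 1)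
  let point : Int := 0
  if dic.size = 1 then
    point + a * 1111
  else if dic.size = 2 then
    -- the loop builds the Python locals `a` (first component) and `b` (second)
    let ab : List Int × List Int := dic.keys.foldl (fun p i =>
        if dic.getD i 0 = 1 then (p.1 ++ [i], p.2)
        else if dic.getD i 0 = 2 then (p.1, p.2 ++ [i])
        else (PySem.List.insert p.1 0 i, p.2)) (([], []) : List Int × List Int)
    if (ab.2.length : Int) = 2 then
      point + (PySem.List.pyGetD ab.2 0 0 + PySem.List.pyGetD ab.2 1 0) *
              |PySem.List.pyGetD ab.2 0 0 - PySem.List.pyGetD ab.2 1 0|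
    else
      point + (10 * PySem.List.pyGetD ab.1 0 0 + PySem.List.pyGetD ab.1 1 0) ^ 2
  else if dic.size = 3 then
    let la : List Int := dic.keys.foldl (fun l i => if dic.getD i 0 ≠ 2 then l ++ [i] else l) []
    point + PySem.List.pyGetD la 0 0 * PySem.List.pyGetD la 1 0
  else
    point + min a (min b (min c d))

-- ===== PORT B =====
def classify (w : Int) (x : Int) (y : Int) (z : Int) : Int :=
  if w = z then w * 1111
  else if w = y then (10 * w + z) ^ 2
  else if x = z then (10 * x + w) ^ 2
  else if w = x ∧ y = z then (w + y) * (y - w)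
  else if w = x then y * z
  else if x = y then w * z
  else if y = z then w * x
  else w

def solution_alt (a : Int) (b : Int) (c : Int) (d : Int) : Int :=
  match PySem.List.sorted [a, b, c, d] (fun v => v) false with
  | [w, x, y, z] => classify w x y z
  | _ => 0  -- unreachable: sorting a 4-list yields a 4-list

-- ===== PRECONDITION & SPEC =====
def Spec_solution (a : Int) (b : Int) (c : Int) (d : Int) (out : Int) : Prop := out = solution_alt a b c d
instance (a : Int) (b : Int) (c : Int) (d : Int) (out : Int) : Decidable (Spec_solution a b c d out) := by unfold Spec_solution; infer_instance

-- ===== CLAIM (what is proved, stated in full; the proofs are below) =====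
def Claim_equal_solution : Prop := ∀ (a : Int) (b : Int) (c : Int) (d : Int), Dom_solution a b c d → Spec_solution a b c d (solution a b c d)

-- ===== LEMMAS AND PROOFS =====
lemma pswap12 (p q r s : Int) : ([q,p,r,s] : List Int).Perm [p,q,r,s] := List.Perm.swap p q [r,s]
lemma pswap23 (p q r s : Int) : ([p,r,q,s] : List Int).Perm [p,q,r,s] := List.Perm.cons p (List.Perm.swap q r [s])
lemma pswap34 (p q r s : Int) : ([p,q,s,r] : List Int).Perm [p,q,r,s] := List.Perm.cons p (List.Perm.cons q (List.Perm.swap r s []))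

lemma Balt (a b c d w x y z : Int) (hp : ([w,x,y,z] : List Int).Perm [a,b,c,d])
    (h1 : w ≤ x) (h2 : x ≤ y) (h3 : y ≤ z) : solution_alt a b c d = classify w x y z := by
  have hs : PySem.List.sorted [a,b,c,d] (fun v => v) false = [w,x,y,z] :=
    PySem.List.sorted_id_eq_of_perm_of_pairwise [a,b,c,d] [w,x,y,z] hp (by simp [List.pairwise_cons]; omega)
  simp [solution_alt, hs]

lemma classify_all (w : Int) : classify w w w w = w * 1111 := by simp [classify]
lemma classify_31 (w z : Int) (h : w ≠ z) : classify w w w z = (10*w+z)^2 := by simp [classify, h]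
lemma classify_13 (w z : Int) (h : w ≠ z) : classify w z z z = (10*z+w)^2 := by simp [classify, h, Ne.symm h]
lemma classify_22 (w y : Int) (h : w ≠ y) : classify w w y y = (w+y)*(y-w) := by simp [classify, h]
lemma classify_pair0 (p u v : Int) (h1 : p ≠ u) (h2 : p ≠ v) (h3 : u ≠ v) : classify p p u v = u*v := by
  simp [classify, h1, h2, h3]
lemma classify_pair1 (u p v : Int) (h1 : u ≠ p) (h2 : u ≠ v) (h3 : p ≠ v) : classify u p p v = u*v := by
  simp [classify, h1, h2, h3]
lemma classify_pair2 (u v p : Int) (h1 : u ≠ v) (h2 : u ≠ p) (h3 : v ≠ p) : classify u v p p = u*v := by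
  simp [classify, h1, h2, h3]
lemma classify_distinct (w x y z : Int) (h1 : w ≠ x) (h2 : w ≠ y) (h3 : w ≠ z)
    (h4 : x ≠ y) (h5 : x ≠ z) (h6 : y ≠ z) : classify w x y z = w := by
  simp [classify, h1, h2, h3, h4, h5, h6]

theorem main_equiv : ∀ (a b c d : Int), solution a b c d = solution_alt a b c d := by
  intro a b c d
  by_cases hba : b = a
  · rw [hba]
    by_cases hca : c = a
    · rw [hca]
      by_cases hda : d = a
      · rw [hda]
        have hA : solution a a a a = a * 1111 := by
          simp [solution, PySem.Dict.insert, PySem.Dict.modify, PySem.Dict.contains, PySem.Dict.getD,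
          PySem.Dict.get?, PySem.Dict.keys, PySem.Dict.size, PySem.Dict.empty,
          PySem.List.insert, PySem.List.sliceIndices, PySem.List.clampIdx, PySem.List.pyGetD, List.foldl, beq_iff_eq]
        rw [hA, Balt a a a a a a a a (List.Perm.refl _) le_rfl le_rfl le_rfl, classify_all]
      · -- d ≠ a: pattern (3,1)
        have hA : solution a a a d = (10*a+d)^2 := by
          simp [solution, PySem.Dict.insert, PySem.Dict.modify, PySem.Dict.contains, PySem.Dict.getD,
            PySem.Dict.get?, PySem.Dict.keys, PySem.Dict.size, PySem.Dict.empty,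
            PySem.List.insert, PySem.List.sliceIndices, PySem.List.clampIdx, PySem.List.pyGetD, List.foldl, beq_iff_eq, hda, Ne.symm hda]
        rcases lt_or_gt_of_ne (hda) with hlt|hlt
        · rw [hA, Balt a a a d d a a a ((pswap12 a d a a).trans ((pswap23 a a d a).trans (pswap34 a a a d))) (by omega) (by omega) (by omega), classify_13 d a (by omega)]
        · rw [hA, Balt a a a d a a a d (List.Perm.refl _) (by omega) (by omega) (by omega), classify_31 a d (by omega)]
    · -- c ≠ a
      by_cases hda : d = a
      · rw [hda] -- pattern a a c a : (3,1)
        have hA : solution a a c a = (10*a+c)^2 := by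
          simp [solution, PySem.Dict.insert, PySem.Dict.modify, PySem.Dict.contains, PySem.Dict.getD,
            PySem.Dict.get?, PySem.Dict.keys, PySem.Dict.size, PySem.Dict.empty,
            PySem.List.insert, PySem.List.sliceIndices, PySem.List.clampIdx, PySem.List.pyGetD, List.foldl, beq_iff_eq, hca, Ne.symm hca]
        rcases lt_or_gt_of_ne (hca) with hlt|hlt
        · rw [hA, Balt a a c a c a a a ((pswap12 a c a a).trans (pswap23 a a c a)) (by omega) (by omega) (by omega), classify_13 c a (by omega)]
        · rw [hA, Balt a a c a a a a c (pswap34 a a c a) (by omega) (by omega) (by omega), classify_31 a c (by omega)]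
      · by_cases hdc : d = c
        · rw [hdc] -- pattern a a c c : (2,2)
          have hA : solution a a c c = (a+c)*|a-c| := by
            simp [solution, PySem.Dict.insert, PySem.Dict.modify, PySem.Dict.contains, PySem.Dict.getD,
              PySem.Dict.get?, PySem.Dict.keys, PySem.Dict.size, PySem.Dict.empty,
              PySem.List.insert, PySem.List.sliceIndices, PySem.List.clampIdx, PySem.List.pyGetD, List.foldl, beq_iff_eq, (Ne.symm hca), Ne.symm (Ne.symm hca)]
          rcases lt_or_gt_of_ne ((Ne.symm hca)) with hlt|hlt
          · rw [hA, Balt a a c c a a c c (List.Perm.refl _) (by omega) (by omega) (by omega), classify_22 a c (by omega)]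
            rw [abs_of_neg (by omega : a - c < (0:Int))]; ring
          · rw [hA, Balt a a c c c c a a ((pswap23 c a c a).trans ((pswap12 a c c a).trans ((pswap34 a c a c).trans (pswap23 a a c c)))) (by omega) (by omega) (by omega), classify_22 c a (by omega)]
            rw [abs_of_pos (by omega : (0:Int) < a - c)]; ring
        · -- pattern a a c d : (2,1,1), singles c d, pair a
          have hA : solution a a c d = c*d := by
            simp [solution, PySem.Dict.insert, PySem.Dict.modify, PySem.Dict.contains, PySem.Dict.getD,
              PySem.Dict.get?, PySem.Dict.keys, PySem.Dict.size, PySem.Dict.empty,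
              PySem.List.insert, PySem.List.sliceIndices, PySem.List.clampIdx, PySem.List.pyGetD, List.foldl, beq_iff_eq, hca, Ne.symm hca, hda, Ne.symm hda, hdc, Ne.symm hdc]
          rcases lt_or_gt_of_ne (hca) with h1|h1
          · rcases lt_or_gt_of_ne (hda) with h2|h2
            · rcases lt_or_gt_of_ne (hdc) with h3|h3
              · rw [hA, Balt a a c d d c a a ((pswap23 d a c a).trans ((pswap12 a d c a).trans ((pswap34 a d a c).trans ((pswap23 a a d c).trans (pswap34 a a c d))))) (by omega) (by omega) (by omega), classify_pair2 d c a (by omega) (by omega) (by omega)]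
                ring
              · rw [hA, Balt a a c d c d a a ((pswap23 c a d a).trans ((pswap12 a c d a).trans ((pswap34 a c a d).trans (pswap23 a a c d)))) (by omega) (by omega) (by omega), classify_pair2 c d a (by omega) (by omega) (by omega)]
            · rw [hA, Balt a a c d c a a d ((pswap12 a c a d).trans (pswap23 a a c d)) (by omega) (by omega) (by omega), classify_pair1 c a d (by omega) (by omega) (by omega)]
          · rcases lt_or_gt_of_ne (hda) with h2|h2
            · rw [hA, Balt a a c d d a a c ((pswap12 a d a c).trans ((pswap23 a a d c).trans (pswap34 a a c d))) (by omega) (by omega) (by omega), classify_pair1 d a c (by omega) (by omega) (by omega)]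
              ring
            · rcases lt_or_gt_of_ne (hdc) with h3|h3
              · rw [hA, Balt a a c d a a d c (pswap34 a a c d) (by omega) (by omega) (by omega), classify_pair0 a d c (by omega) (by omega) (by omega)]
                ring
              · rw [hA, Balt a a c d a a c d (List.Perm.refl _) (by omega) (by omega) (by omega), classify_pair0 a c d (by omega) (by omega) (by omega)]
  · -- b ≠ a
    by_cases hca : c = a
    · rw [hca]
      by_cases hda : d = a
      · rw [hda] -- pattern a b a a : (3,1) triple a single b
        have hA : solution a b a a = (10*a+b)^2 := by
          simp [solution, PySem.Dict.insert, PySem.Dict.modify, PySem.Dict.contains, PySem.Dict.getD,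
            PySem.Dict.get?, PySem.Dict.keys, PySem.Dict.size, PySem.Dict.empty,
            PySem.List.insert, PySem.List.sliceIndices, PySem.List.clampIdx, PySem.List.pyGetD, List.foldl, beq_iff_eq, hba, Ne.symm hba]
        rcases lt_or_gt_of_ne (hba) with hlt|hlt
        · rw [hA, Balt a b a a b a a a (pswap12 a b a a) (by omega) (by omega) (by omega), classify_13 b a (by omega)]
        · rw [hA, Balt a b a a a a a b ((pswap34 a a b a).trans (pswap23 a b a a)) (by omega) (by omega) (by omega), classify_31 a b (by omega)]
      · by_cases hdb : d = b
        · rw [hdb] -- pattern a b a b : (2,2)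
          have hA : solution a b a b = (a+b)*|a-b| := by
            simp [solution, PySem.Dict.insert, PySem.Dict.modify, PySem.Dict.contains, PySem.Dict.getD,
              PySem.Dict.get?, PySem.Dict.keys, PySem.Dict.size, PySem.Dict.empty,
              PySem.List.insert, PySem.List.sliceIndices, PySem.List.clampIdx, PySem.List.pyGetD, List.foldl, beq_iff_eq, (Ne.symm hba), Ne.symm (Ne.symm hba)]
          rcases lt_or_gt_of_ne ((Ne.symm hba)) with hlt|hlt
          · rw [hA, Balt a b a b a a b b (pswap23 a b a b) (by omega) (by omega) (by omega), classify_22 a b (by omega)]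
            rw [abs_of_neg (by omega : a - b < (0:Int))]; ring
          · rw [hA, Balt a b a b b b a a ((pswap23 b a b a).trans ((pswap12 a b b a).trans (pswap34 a b a b))) (by omega) (by omega) (by omega), classify_22 b a (by omega)]
            rw [abs_of_pos (by omega : (0:Int) < a - b)]; ring
        · -- pattern a b a d : (2,1,1) pair a, singles b d
          have hA : solution a b a d = b*d := by
            simp [solution, PySem.Dict.insert, PySem.Dict.modify, PySem.Dict.contains, PySem.Dict.getD,
              PySem.Dict.get?, PySem.Dict.keys, PySem.Dict.size, PySem.Dict.empty,
              PySem.List.insert, PySem.List.sliceIndices, PySem.List.clampIdx, PySem.List.pyGetD, List.foldl, beq_iff_eq, hba, Ne.symm hba, hda, Ne.symm hda, hdb, Ne.symm hdb]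
          rcases lt_or_gt_of_ne (hba) with h1|h1
          · rcases lt_or_gt_of_ne (hda) with h2|h2
            · rcases lt_or_gt_of_ne (hdb) with h3|h3
              · rw [hA, Balt a b a d d b a a ((pswap23 d a b a).trans ((pswap12 a d b a).trans ((pswap23 a b d a).trans (pswap34 a b a d)))) (by omega) (by omega) (by omega), classify_pair2 d b a (by omega) (by omega) (by omega)]
                ring
              · rw [hA, Balt a b a d b d a a ((pswap23 b a d a).trans ((pswap12 a b d a).trans (pswap34 a b a d))) (by omega) (by omega) (by omega), classify_pair2 b d a (by omega) (by omega) (by omega)]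
            · rw [hA, Balt a b a d b a a d (pswap12 a b a d) (by omega) (by omega) (by omega), classify_pair1 b a d (by omega) (by omega) (by omega)]
          · rcases lt_or_gt_of_ne (hda) with h2|h2
            · rw [hA, Balt a b a d d a a b ((pswap12 a d a b).trans ((pswap34 a d b a).trans ((pswap23 a b d a).trans (pswap34 a b a d)))) (by omega) (by omega) (by omega), classify_pair1 d a b (by omega) (by omega) (by omega)]
              ring
            · rcases lt_or_gt_of_ne (hdb) with h3|h3
              · rw [hA, Balt a b a d a a d b ((pswap34 a a b d).trans (pswap23 a b a d)) (by omega) (by omega) (by omega), classify_pair0 a d b (by omega) (by omega) (by omega)]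
                ring
              · rw [hA, Balt a b a d a a b d (pswap23 a b a d) (by omega) (by omega) (by omega), classify_pair0 a b d (by omega) (by omega) (by omega)]
    · -- c ≠ a
      by_cases hcb : c = b
      · rw [hcb]
        by_cases hda : d = a
        · rw [hda] -- pattern a b b a : (2,2)
          have hA : solution a b b a = (a+b)*|a-b| := by
            simp [solution, PySem.Dict.insert, PySem.Dict.modify, PySem.Dict.contains, PySem.Dict.getD,
              PySem.Dict.get?, PySem.Dict.keys, PySem.Dict.size, PySem.Dict.empty,
              PySem.List.insert, PySem.List.sliceIndices, PySem.List.clampIdx, PySem.List.pyGetD, List.foldl, beq_iff_eq, (Ne.symm hba), Ne.symm (Ne.symm hba)]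
          rcases lt_or_gt_of_ne ((Ne.symm hba)) with hlt|hlt
          · rw [hA, Balt a b b a a a b b ((pswap23 a b a b).trans (pswap34 a b b a)) (by omega) (by omega) (by omega), classify_22 a b (by omega)]
            rw [abs_of_neg (by omega : a - b < (0:Int))]; ring
          · rw [hA, Balt a b b a b b a a ((pswap23 b a b a).trans (pswap12 a b b a)) (by omega) (by omega) (by omega), classify_22 b a (by omega)]
            rw [abs_of_pos (by omega : (0:Int) < a - b)]; ring
        · by_cases hdb : d = b
          · rw [hdb] -- pattern a b b b : (3,1) triple b single a
            have hA : solution a b b b = (10*b+a)^2 := by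
              simp [solution, PySem.Dict.insert, PySem.Dict.modify, PySem.Dict.contains, PySem.Dict.getD,
                PySem.Dict.get?, PySem.Dict.keys, PySem.Dict.size, PySem.Dict.empty,
                PySem.List.insert, PySem.List.sliceIndices, PySem.List.clampIdx, PySem.List.pyGetD, List.foldl, beq_iff_eq, (Ne.symm hba), Ne.symm (Ne.symm hba)]
            rcases lt_or_gt_of_ne ((Ne.symm hba)) with hlt|hlt
            · rw [hA, Balt a b b b a b b b (List.Perm.refl _) (by omega) (by omega) (by omega), classify_13 a b (by omega)]
            · rw [hA, Balt a b b b b b b a ((pswap34 b b a b).trans ((pswap23 b a b b).trans (pswap12 a b b b))) (by omega) (by omega) (by omega), classify_31 b a (by omega)]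
          · -- pattern a b b d : (2,1,1) pair b, singles a d
            have hA : solution a b b d = a*d := by
              simp [solution, PySem.Dict.insert, PySem.Dict.modify, PySem.Dict.contains, PySem.Dict.getD,
                PySem.Dict.get?, PySem.Dict.keys, PySem.Dict.size, PySem.Dict.empty,
                PySem.List.insert, PySem.List.sliceIndices, PySem.List.clampIdx, PySem.List.pyGetD, List.foldl, beq_iff_eq, (Ne.symm hba), Ne.symm (Ne.symm hba), hdb, Ne.symm hdb, hda, Ne.symm hda]
            rcases lt_or_gt_of_ne ((Ne.symm hba)) with h1|h1
            · rcases lt_or_gt_of_ne (hdb) with h2|h2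
              · rcases lt_or_gt_of_ne (hda) with h3|h3
                · rw [hA, Balt a b b d d a b b ((pswap12 a d b b).trans ((pswap23 a b d b).trans (pswap34 a b b d))) (by omega) (by omega) (by omega), classify_pair2 d a b (by omega) (by omega) (by omega)]
                  ring
                · rw [hA, Balt a b b d a d b b ((pswap23 a b d b).trans (pswap34 a b b d)) (by omega) (by omega) (by omega), classify_pair2 a d b (by omega) (by omega) (by omega)]
              · rw [hA, Balt a b b d a b b d (List.Perm.refl _) (by omega) (by omega) (by omega), classify_pair1 a b d (by omega) (by omega) (by omega)]
            · rcases lt_or_gt_of_ne (hdb) with h2|h2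
              · rw [hA, Balt a b b d d b b a ((pswap34 d b a b).trans ((pswap23 d a b b).trans ((pswap12 a d b b).trans ((pswap23 a b d b).trans (pswap34 a b b d))))) (by omega) (by omega) (by omega), classify_pair1 d b a (by omega) (by omega) (by omega)]
                ring
              · rcases lt_or_gt_of_ne (hda) with h3|h3
                · rw [hA, Balt a b b d b b d a ((pswap34 b b a d).trans ((pswap23 b a b d).trans (pswap12 a b b d))) (by omega) (by omega) (by omega), classify_pair0 b d a (by omega) (by omega) (by omega)]
                  ring
                · rw [hA, Balt a b b d b b a d ((pswap23 b a b d).trans (pswap12 a b b d)) (by omega) (by omega) (by omega), classify_pair0 b a d (by omega) (by omega) (by omega)]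
      · -- c ∉ {a,b}
        by_cases hda : d = a
        · rw [hda] -- pattern a b c a : (2,1,1) pair a, singles b c
          have hA : solution a b c a = b*c := by
            simp [solution, PySem.Dict.insert, PySem.Dict.modify, PySem.Dict.contains, PySem.Dict.getD,
              PySem.Dict.get?, PySem.Dict.keys, PySem.Dict.size, PySem.Dict.empty,
              PySem.List.insert, PySem.List.sliceIndices, PySem.List.clampIdx, PySem.List.pyGetD, List.foldl, beq_iff_eq, hba, Ne.symm hba, hca, Ne.symm hca, hcb, Ne.symm hcb]
          rcases lt_or_gt_of_ne (hba) with h1|h1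
          · rcases lt_or_gt_of_ne (hca) with h2|h2
            · rcases lt_or_gt_of_ne (hcb) with h3|h3
              · rw [hA, Balt a b c a c b a a ((pswap23 c a b a).trans ((pswap12 a c b a).trans (pswap23 a b c a))) (by omega) (by omega) (by omega), classify_pair2 c b a (by omega) (by omega) (by omega)]
                ring
              · rw [hA, Balt a b c a b c a a ((pswap23 b a c a).trans (pswap12 a b c a)) (by omega) (by omega) (by omega), classify_pair2 b c a (by omega) (by omega) (by omega)]
            · rw [hA, Balt a b c a b a a c ((pswap12 a b a c).trans (pswap34 a b c a)) (by omega) (by omega) (by omega), classify_pair1 b a c (by omega) (by omega) (by omega)]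
          · rcases lt_or_gt_of_ne (hca) with h2|h2
            · rw [hA, Balt a b c a c a a b ((pswap12 a c a b).trans ((pswap34 a c b a).trans (pswap23 a b c a))) (by omega) (by omega) (by omega), classify_pair1 c a b (by omega) (by omega) (by omega)]
              ring
            · rcases lt_or_gt_of_ne (hcb) with h3|h3
              · rw [hA, Balt a b c a a a c b ((pswap34 a a b c).trans ((pswap23 a b a c).trans (pswap34 a b c a))) (by omega) (by omega) (by omega), classify_pair0 a c b (by omega) (by omega) (by omega)]
                ring
              · rw [hA, Balt a b c a a a b c ((pswap23 a b a c).trans (pswap34 a b c a)) (by omega) (by omega) (by omega), classify_pair0 a b c (by omega) (by omega) (by omega)]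
        · by_cases hdb : d = b
          · rw [hdb] -- pattern a b c b : (2,1,1) pair b, singles a c
            have hA : solution a b c b = a*c := by
              simp [solution, PySem.Dict.insert, PySem.Dict.modify, PySem.Dict.contains, PySem.Dict.getD,
                PySem.Dict.get?, PySem.Dict.keys, PySem.Dict.size, PySem.Dict.empty,
                PySem.List.insert, PySem.List.sliceIndices, PySem.List.clampIdx, PySem.List.pyGetD, List.foldl, beq_iff_eq, (Ne.symm hba), Ne.symm (Ne.symm hba), hcb, Ne.symm hcb, hca, Ne.symm hca]
            rcases lt_or_gt_of_ne ((Ne.symm hba)) with h1|h1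
            · rcases lt_or_gt_of_ne (hcb) with h2|h2
              · rcases lt_or_gt_of_ne (hca) with h3|h3
                · rw [hA, Balt a b c b c a b b ((pswap12 a c b b).trans (pswap23 a b c b)) (by omega) (by omega) (by omega), classify_pair2 c a b (by omega) (by omega) (by omega)]
                  ring
                · rw [hA, Balt a b c b a c b b (pswap23 a b c b) (by omega) (by omega) (by omega), classify_pair2 a c b (by omega) (by omega) (by omega)]
              · rw [hA, Balt a b c b a b b c (pswap34 a b c b) (by omega) (by omega) (by omega), classify_pair1 a b c (by omega) (by omega) (by omega)]
            · rcases lt_or_gt_of_ne (hcb) with h2|h2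
              · rw [hA, Balt a b c b c b b a ((pswap34 c b a b).trans ((pswap23 c a b b).trans ((pswap12 a c b b).trans (pswap23 a b c b)))) (by omega) (by omega) (by omega), classify_pair1 c b a (by omega) (by omega) (by omega)]
                ring
              · rcases lt_or_gt_of_ne (hca) with h3|h3
                · rw [hA, Balt a b c b b b c a ((pswap34 b b a c).trans ((pswap23 b a b c).trans ((pswap12 a b b c).trans (pswap34 a b c b)))) (by omega) (by omega) (by omega), classify_pair0 b c a (by omega) (by omega) (by omega)]
                  ring
                · rw [hA, Balt a b c b b b a c ((pswap23 b a b c).trans ((pswap12 a b b c).trans (pswap34 a b c b))) (by omega) (by omega) (by omega), classify_pair0 b a c (by omega) (by omega) (by omega)]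
          · by_cases hdc : d = c
            · rw [hdc] -- pattern a b c c : (2,1,1) pair c, singles a b
              have hA : solution a b c c = a*b := by
                simp [solution, PySem.Dict.insert, PySem.Dict.modify, PySem.Dict.contains, PySem.Dict.getD,
                  PySem.Dict.get?, PySem.Dict.keys, PySem.Dict.size, PySem.Dict.empty,
                  PySem.List.insert, PySem.List.sliceIndices, PySem.List.clampIdx, PySem.List.pyGetD, List.foldl, beq_iff_eq, (Ne.symm hca), Ne.symm (Ne.symm hca), (Ne.symm hcb), Ne.symm (Ne.symm hcb), hba, Ne.symm hba]
              rcases lt_or_gt_of_ne ((Ne.symm hca)) with h1|h1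
              · rcases lt_or_gt_of_ne ((Ne.symm hcb)) with h2|h2
                · rcases lt_or_gt_of_ne (hba) with h3|h3
                  · rw [hA, Balt a b c c b a c c (pswap12 a b c c) (by omega) (by omega) (by omega), classify_pair2 b a c (by omega) (by omega) (by omega)]
                    ring
                  · rw [hA, Balt a b c c a b c c (List.Perm.refl _) (by omega) (by omega) (by omega), classify_pair2 a b c (by omega) (by omega) (by omega)]
                · rw [hA, Balt a b c c a c c b ((pswap34 a c b c).trans (pswap23 a b c c)) (by omega) (by omega) (by omega), classify_pair1 a c b (by omega) (by omega) (by omega)]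
              · rcases lt_or_gt_of_ne ((Ne.symm hcb)) with h2|h2
                · rw [hA, Balt a b c c b c c a ((pswap34 b c a c).trans ((pswap23 b a c c).trans (pswap12 a b c c))) (by omega) (by omega) (by omega), classify_pair1 b c a (by omega) (by omega) (by omega)]
                  ring
                · rcases lt_or_gt_of_ne (hba) with h3|h3
                  · rw [hA, Balt a b c c c c b a ((pswap34 c c a b).trans ((pswap23 c a c b).trans ((pswap12 a c c b).trans ((pswap34 a c b c).trans (pswap23 a b c c))))) (by omega) (by omega) (by omega), classify_pair0 c b a (by omega) (by omega) (by omega)]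
                    ring
                  · rw [hA, Balt a b c c c c a b ((pswap23 c a c b).trans ((pswap12 a c c b).trans ((pswap34 a c b c).trans (pswap23 a b c c)))) (by omega) (by omega) (by omega), classify_pair0 c a b (by omega) (by omega) (by omega)]
            · -- all four distinct
              have hA : solution a b c d = min a (min b (min c d)) := by
                simp [solution, PySem.Dict.insert, PySem.Dict.modify, PySem.Dict.contains, PySem.Dict.getD,
                  PySem.Dict.get?, PySem.Dict.keys, PySem.Dict.size, PySem.Dict.empty,
                  PySem.List.insert, PySem.List.sliceIndices, PySem.List.clampIdx, PySem.List.pyGetD, List.foldl, beq_iff_eq, hba, Ne.symm hba, hca, Ne.symm hca, hcb, Ne.symm hcb, hda, Ne.symm hda, hdb, Ne.symm hdb, hdc, Ne.symm hdc]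
              rcases lt_or_gt_of_ne hba with o1|o1  -- b < a | a < b
              · -- b < a
                  rcases lt_or_gt_of_ne hcb with o2|o2
                  · -- c < b
                    rcases lt_or_gt_of_ne hdc with o4|o4
                    · rw [hA, Balt a b c d d c b a ((pswap34 d c a b).trans ((pswap23 d a c b).trans ((pswap12 a d c b).trans ((pswap34 a d b c).trans ((pswap23 a b d c).trans (pswap34 a b c d)))))) (by omega) (by omega) (by omega), classify_distinct d c b a (by omega) (by omega) (by omega) (by omega) (by omega) (by omega)]
                      omega
                    · rcases lt_or_gt_of_ne hdb with o5|o5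
                      · rw [hA, Balt a b c d c d b a ((pswap34 c d a b).trans ((pswap23 c a d b).trans ((pswap12 a c d b).trans ((pswap34 a c b d).trans (pswap23 a b c d))))) (by omega) (by omega) (by omega), classify_distinct c d b a (by omega) (by omega) (by omega) (by omega) (by omega) (by omega)]
                        omega
                      · rcases lt_or_gt_of_ne hda with o6|o6
                        · rw [hA, Balt a b c d c b d a ((pswap34 c b a d).trans ((pswap23 c a b d).trans ((pswap12 a c b d).trans (pswap23 a b c d)))) (by omega) (by omega) (by omega), classify_distinct c b d a (by omega) (by omega) (by omega) (by omega) (by omega) (by omega)]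
                          omega
                        · rw [hA, Balt a b c d c b a d ((pswap23 c a b d).trans ((pswap12 a c b d).trans (pswap23 a b c d))) (by omega) (by omega) (by omega), classify_distinct c b a d (by omega) (by omega) (by omega) (by omega) (by omega) (by omega)]
                          omega
                  · rcases lt_or_gt_of_ne hca with o3|o3
                    · -- c < a
                      rcases lt_or_gt_of_ne hdb with o4|o4
                      · rw [hA, Balt a b c d d b c a ((pswap34 d b a c).trans ((pswap23 d a b c).trans ((pswap12 a d b c).trans ((pswap23 a b d c).trans (pswap34 a b c d))))) (by omega) (by omega) (by omega), classify_distinct d b c a (by omega) (by omega) (by omega) (by omega) (by omega) (by omega)]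
                        omega
                      · rcases lt_or_gt_of_ne hdc with o5|o5
                        · rw [hA, Balt a b c d b d c a ((pswap34 b d a c).trans ((pswap23 b a d c).trans ((pswap12 a b d c).trans (pswap34 a b c d)))) (by omega) (by omega) (by omega), classify_distinct b d c a (by omega) (by omega) (by omega) (by omega) (by omega) (by omega)]
                          omega
                        · rcases lt_or_gt_of_ne hda with o6|o6
                          · rw [hA, Balt a b c d b c d a ((pswap34 b c a d).trans ((pswap23 b a c d).trans (pswap12 a b c d))) (by omega) (by omega) (by omega), classify_distinct b c d a (by omega) (by omega) (by omega) (by omega) (by omega) (by omega)]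
                            omega
                          · rw [hA, Balt a b c d b c a d ((pswap23 b a c d).trans (pswap12 a b c d)) (by omega) (by omega) (by omega), classify_distinct b c a d (by omega) (by omega) (by omega) (by omega) (by omega) (by omega)]
                            omega
                    · -- a < c
                      rcases lt_or_gt_of_ne hdb with o4|o4
                      · rw [hA, Balt a b c d d b a c ((pswap23 d a b c).trans ((pswap12 a d b c).trans ((pswap23 a b d c).trans (pswap34 a b c d)))) (by omega) (by omega) (by omega), classify_distinct d b a c (by omega) (by omega) (by omega) (by omega) (by omega) (by omega)]
                        omega
                      · rcases lt_or_gt_of_ne hda with o5|o5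
                        · rw [hA, Balt a b c d b d a c ((pswap23 b a d c).trans ((pswap12 a b d c).trans (pswap34 a b c d))) (by omega) (by omega) (by omega), classify_distinct b d a c (by omega) (by omega) (by omega) (by omega) (by omega) (by omega)]
                          omega
                        · rcases lt_or_gt_of_ne hdc with o6|o6
                          · rw [hA, Balt a b c d b a d c ((pswap12 a b d c).trans (pswap34 a b c d)) (by omega) (by omega) (by omega), classify_distinct b a d c (by omega) (by omega) (by omega) (by omega) (by omega) (by omega)]
                            omega
                          · rw [hA, Balt a b c d b a c d (pswap12 a b c d) (by omega) (by omega) (by omega), classify_distinct b a c d (by omega) (by omega) (by omega) (by omega) (by omega) (by omega)]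
                            omega
              · -- a < b
                  rcases lt_or_gt_of_ne hca with o2|o2
                  · -- c < a
                    rcases lt_or_gt_of_ne hdc with o4|o4
                    · rw [hA, Balt a b c d d c a b ((pswap23 d a c b).trans ((pswap12 a d c b).trans ((pswap34 a d b c).trans ((pswap23 a b d c).trans (pswap34 a b c d))))) (by omega) (by omega) (by omega), classify_distinct d c a b (by omega) (by omega) (by omega) (by omega) (by omega) (by omega)]
                      omega
                    · rcases lt_or_gt_of_ne hda with o5|o5
                      · rw [hA, Balt a b c d c d a b ((pswap23 c a d b).trans ((pswap12 a c d b).trans ((pswap34 a c b d).trans (pswap23 a b c d)))) (by omega) (by omega) (by omega), classify_distinct c d a b (by omega) (by omega) (by omega) (by omega) (by omega) (by omega)]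
                        omega
                      · rcases lt_or_gt_of_ne hdb with o6|o6
                        · rw [hA, Balt a b c d c a d b ((pswap12 a c d b).trans ((pswap34 a c b d).trans (pswap23 a b c d))) (by omega) (by omega) (by omega), classify_distinct c a d b (by omega) (by omega) (by omega) (by omega) (by omega) (by omega)]
                          omega
                        · rw [hA, Balt a b c d c a b d ((pswap12 a c b d).trans (pswap23 a b c d)) (by omega) (by omega) (by omega), classify_distinct c a b d (by omega) (by omega) (by omega) (by omega) (by omega) (by omega)]
                          omega
                  · rcases lt_or_gt_of_ne hcb with o3|o3
                    · -- c < b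
                      rcases lt_or_gt_of_ne hda with o4|o4
                      · rw [hA, Balt a b c d d a c b ((pswap12 a d c b).trans ((pswap34 a d b c).trans ((pswap23 a b d c).trans (pswap34 a b c d)))) (by omega) (by omega) (by omega), classify_distinct d a c b (by omega) (by omega) (by omega) (by omega) (by omega) (by omega)]
                        omega
                      · rcases lt_or_gt_of_ne hdc with o5|o5
                        · rw [hA, Balt a b c d a d c b ((pswap34 a d b c).trans ((pswap23 a b d c).trans (pswap34 a b c d))) (by omega) (by omega) (by omega), classify_distinct a d c b (by omega) (by omega) (by omega) (by omega) (by omega) (by omega)]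
                          omega
                        · rcases lt_or_gt_of_ne hdb with o6|o6
                          · rw [hA, Balt a b c d a c d b ((pswap34 a c b d).trans (pswap23 a b c d)) (by omega) (by omega) (by omega), classify_distinct a c d b (by omega) (by omega) (by omega) (by omega) (by omega) (by omega)]
                            omega
                          · rw [hA, Balt a b c d a c b d (pswap23 a b c d) (by omega) (by omega) (by omega), classify_distinct a c b d (by omega) (by omega) (by omega) (by omega) (by omega) (by omega)]
                            omega
                    · -- b < c
                      rcases lt_or_gt_of_ne hda with o4|o4
                      · rw [hA, Balt a b c d d a b c ((pswap12 a d b c).trans ((pswap23 a b d c).trans (pswap34 a b c d))) (by omega) (by omega) (by omega), classify_distinct d a b c (by omega) (by omega) (by omega) (by omega) (by omega) (by omega)]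
                        omega
                      · rcases lt_or_gt_of_ne hdb with o5|o5
                        · rw [hA, Balt a b c d a d b c ((pswap23 a b d c).trans (pswap34 a b c d)) (by omega) (by omega) (by omega), classify_distinct a d b c (by omega) (by omega) (by omega) (by omega) (by omega) (by omega)]
                          omega
                        · rcases lt_or_gt_of_ne hdc with o6|o6
                          · rw [hA, Balt a b c d a b d c (pswap34 a b c d) (by omega) (by omega) (by omega), classify_distinct a b d c (by omega) (by omega) (by omega) (by omega) (by omega) (by omega)]
                            omega
                          · rw [hA, Balt a b c d a b c d (List.Perm.refl _) (by omega) (by omega) (by omega), classify_distinct a b c d (by omega) (by omega) (by omega) (by omega) (by omega) (by omega)]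
                            omega

-- ===== VERDICT (by name: the statement is the Claim_ definition above) =====
theorem solution_spec : Claim_equal_solution := by
  intro a b c d _
  unfold Spec_solution
  exact main_equiv a b c d
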